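-- pv_equiv track=rewrite | github.com/LiadFirouz/Python_Course | Chapter 4 - strings/Abanibi.py | abanibi
-- ===== SOURCE A (Python) =====
-- def abanibi(str):
--     end = 0
--     if 'a' in str or 'e' in str or 'i' in str or 'o' in str or 'u' in str:
--         while end < len(str):
--             if 'a' == str[end] or 'e' == str[end] or 'i' == str[end] or 'o' == str[end] or 'u' == str[end]:
--                 str = str[:end] + str[end] + "b" + str[end:]
--                 end += 2
--
--             end += 1
--
--     return str
-- ===== SOURCE B (Python) =====
-- def abanibi(str):
--     table = {ord(v): v + 'b' + v for v in 'aeiou'}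
--     return str.translate(table)
-- ===== Notes on version B (the rewrite author's own statement) =====
-- stated objective: idiomatic
-- what changed: Replaces A's index loop that repeatedly rebuilds the string by slicing (inserting 'b'+vowel in place and skipping the inserted characters) with a precomputed vowel->tripled-form translation table applied in one table-driven pass via str.translate.
import Mathlib
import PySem

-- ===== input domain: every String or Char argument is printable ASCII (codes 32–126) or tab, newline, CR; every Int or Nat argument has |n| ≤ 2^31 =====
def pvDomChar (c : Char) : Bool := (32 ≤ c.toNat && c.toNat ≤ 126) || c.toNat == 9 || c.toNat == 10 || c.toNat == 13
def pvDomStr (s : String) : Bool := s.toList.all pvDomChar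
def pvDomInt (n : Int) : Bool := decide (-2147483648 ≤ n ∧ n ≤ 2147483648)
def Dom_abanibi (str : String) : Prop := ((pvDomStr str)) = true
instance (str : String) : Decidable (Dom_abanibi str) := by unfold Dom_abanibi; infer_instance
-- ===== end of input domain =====

-- B replaces A's in-place insertion loop with a precomputed vowel->tripled-form table applied in one pass (idiomatic).

-- ===== PORT A =====
-- A's chained '==' vowel test on the current character
def aIsVowel (c : Char) : Bool := c == 'a' || c == 'e' || c == 'i' || c == 'o' || c == 'u'

-- A's while loop: str is rebuilt by slicing at each vowel, end skips the inserted "b"+vowel.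
-- (String represented as List Char; slices str[:end] / str[end:] are take/drop, exact for 0 ≤ end.)
def aLoop (s : List Char) (e : Nat) : List Char :=
  if h : e < s.length then
    if aIsVowel s[e] then
      aLoop (s.take e ++ [s[e], 'b'] ++ s.drop e) (e + 3)
    else
      aLoop s (e + 1)
  else s
termination_by s.length - e
decreasing_by
  · simp; omega
  · omega

def abanibi (str : String) : String :=
  let s := str.toList
  if s.contains 'a' || s.contains 'e' || s.contains 'i' || s.contains 'o' || s.contains 'u' then
    String.ofList (aLoop s 0)
  else
    String.ofList s

-- ===== PORT B =====
-- Source B: translation table {vowel ↦ vowel+'b'+vowel}, applied char-by-char by translate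
def bTable : PySem.Dict Char (List Char) :=
  (PySem.Dict.empty.insert 'a' ['a','b','a']).insert 'e' ['e','b','e']
    |>.insert 'i' ['i','b','i'] |>.insert 'o' ['o','b','o'] |>.insert 'u' ['u','b','u']

def abanibi_alt (str : String) : String :=
  String.ofList (str.toList.flatMap fun c => (bTable.get? c).getD [c])

-- ===== PRECONDITION & SPEC =====
def Spec_abanibi (str : String) (out : String) : Prop := out = abanibi_alt str
instance (str : String) (out : String) : Decidable (Spec_abanibi str out) := by unfold Spec_abanibi; infer_instance

-- ===== CLAIM (what is proved, stated in full; the proofs are below) =====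
def Claim_equal_abanibi : Prop := ∀ (str : String), Dom_abanibi str → Spec_abanibi str (abanibi str)

-- ===== LEMMAS AND PROOFS =====

-- the per-character translation both sides perform
def trChar (c : Char) : List Char := (bTable.get? c).getD [c]

theorem trChar_eq (c : Char) : trChar c = if aIsVowel c then [c, 'b', c] else [c] := by
  by_cases h : c = 'a' ∨ c = 'e' ∨ c = 'i' ∨ c = 'o' ∨ c = 'u'
  · rcases h with rfl | rfl | rfl | rfl | rfl <;>
      simp [trChar, bTable, aIsVowel, PySem.Dict.get?, PySem.Dict.insert, PySem.Dict.empty]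
  · push_neg at h
    obtain ⟨ha, he, hi, ho, hu⟩ := h
    have ha' : ('a' == c) = false := beq_eq_false_iff_ne.2 (Ne.symm ha)
    have he' : ('e' == c) = false := beq_eq_false_iff_ne.2 (Ne.symm he)
    have hi' : ('i' == c) = false := beq_eq_false_iff_ne.2 (Ne.symm hi)
    have ho' : ('o' == c) = false := beq_eq_false_iff_ne.2 (Ne.symm ho)
    have hu' : ('u' == c) = false := beq_eq_false_iff_ne.2 (Ne.symm hu)
    have va : (c == 'a') = false := beq_eq_false_iff_ne.2 ha
    have ve : (c == 'e') = false := beq_eq_false_iff_ne.2 he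
    have vi : (c == 'i') = false := beq_eq_false_iff_ne.2 hi
    have vo : (c == 'o') = false := beq_eq_false_iff_ne.2 ho
    have vu : (c == 'u') = false := beq_eq_false_iff_ne.2 hu
    simp [trChar, bTable, aIsVowel, PySem.Dict.get?, PySem.Dict.insert, PySem.Dict.empty,
      List.find?, ha', he', hi', ho', hu', va, ve, vi, vo, vu]

-- loop invariant: with a fully processed prefix p and unprocessed tail t, the loop
-- translates each character of t in place
theorem aLoop_pre (t p : List Char) : aLoop (p ++ t) p.length = p ++ t.flatMap trChar := by
  induction t generalizing p with
  | nil => rw [aLoop]; simp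
  | cons c t ih =>
    rw [aLoop]
    have hlt : p.length < (p ++ c :: t).length := by simp
    have hget : (p ++ c :: t)[p.length]'hlt = c := by
      simp [List.getElem_append_right (Nat.le_refl p.length)]
    simp only [hlt, dif_pos, hget]
    by_cases hv : aIsVowel c
    · simp only [hv, if_pos]
      have h1 : (p ++ c :: t).take p.length = p := by simp
      have h2 : (p ++ c :: t).drop p.length = c :: t := by simp
      rw [h1, h2]
      have : p ++ [c, 'b'] ++ (c :: t) = (p ++ [c, 'b', c]) ++ t := by simp
      rw [this, show p.length + 3 = (p ++ [c, 'b', c]).length by simp, ih]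
      simp [trChar_eq, hv]
    · simp only [hv, if_neg, Bool.not_eq_true]
      rw [show p.length + 1 = (p ++ [c]).length by simp,
        show p ++ c :: t = (p ++ [c]) ++ t by simp, ih]
      simp [trChar_eq, hv]

theorem flatMap_id_of (l : List Char) (h : ∀ c ∈ l, trChar c = [c]) :
    l.flatMap trChar = l := by
  induction l with
  | nil => simp
  | cons c t ih =>
    simp only [List.flatMap_cons, h c (by simp), ih (fun x hx => h x (by simp [hx]))]
    rfl

-- ===== VERDICT (by name: the statement is the Claim_ definition above) =====
theorem abanibi_spec : Claim_equal_abanibi := by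
  intro str _
  unfold Spec_abanibi abanibi abanibi_alt
  simp only [show (fun c => ((bTable.get? c).getD [c])) = trChar from rfl]
  split
  · rw [show str.toList = [] ++ str.toList from rfl, show (0 : Nat) = ([] : List Char).length from rfl,
      aLoop_pre]
    simp
  · rename_i hno
    simp only [Bool.or_eq_true, List.contains_eq_mem, decide_eq_true_eq, not_or] at hno
    obtain ⟨⟨⟨⟨h1, h2⟩, h3⟩, h4⟩, h5⟩ := hno
    congr 1
    refine (flatMap_id_of _ ?_).symm
    intro c hc
    rw [trChar_eq]
    have hv : aIsVowel c = false := by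
      unfold aIsVowel
      simp only [Bool.or_eq_false_iff, beq_eq_false_iff_ne]
      refine ⟨⟨⟨⟨?_, ?_⟩, ?_⟩, ?_⟩, ?_⟩ <;> rintro rfl
      exacts [h1 hc, h2 hc, h3 hc, h4 hc, h5 hc]
    simp [hv]
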